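-- pv_equiv track=rewrite | github.com/J-Zehra/IntelliGrader-backend | utils.py | check
-- ===== SOURCE A (Python) =====
-- def check(extracted_answers, correct_answers, parts):
--     number_of_correct = 0
--     number_of_incorrect = 0
--     total_score = 0
--     total_perfect_score = 0
--
--     current_index = 0
--
--     for part in parts:
--         part_size = part['totalNumber']
--         part_answers = extracted_answers[current_index:current_index + part_size]
--         part_correct = correct_answers[current_index:current_index + part_size]
--
--         for correct, student in zip(part_correct, part_answers):
--             if correct == student:
--                 number_of_correct += 1
--                 total_score += part['points']
--             else:
--                 number_of_incorrect += 1
--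
--         total_perfect_score += part['points'] * part_size
--         current_index += part_size
--
--     return number_of_correct, number_of_incorrect, total_score, total_perfect_score
-- ===== SOURCE B (Python) =====
-- def check(extracted_answers, correct_answers, parts):
--     total_perfect_score = sum(p['points'] * p['totalNumber'] for p in parts)
--     points_flat = [p['points'] for p in parts for _ in range(p['totalNumber'])]
--     number_of_correct = 0
--     number_of_incorrect = 0
--     total_score = 0
--     for correct, student, pts in zip(correct_answers, extracted_answers, points_flat):
--         if correct == student:
--             number_of_correct += 1
--             total_score += pts
--         else:
--             number_of_incorrect += 1
--     return number_of_correct, number_of_incorrect, total_score, total_perfect_score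
-- ===== Notes on version B (the rewrite author's own statement) =====
-- stated objective: simpler
-- what changed: Replaces the part-by-part slicing loop with an index cursor by a precomputed perfect-score sum, a flattened per-question points array, and one flat zip loop over the three sequences.
-- outside the precondition, e.g. on check([], [], [{'points': 2}]): A raises KeyError, B raises KeyError
import Mathlib
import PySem

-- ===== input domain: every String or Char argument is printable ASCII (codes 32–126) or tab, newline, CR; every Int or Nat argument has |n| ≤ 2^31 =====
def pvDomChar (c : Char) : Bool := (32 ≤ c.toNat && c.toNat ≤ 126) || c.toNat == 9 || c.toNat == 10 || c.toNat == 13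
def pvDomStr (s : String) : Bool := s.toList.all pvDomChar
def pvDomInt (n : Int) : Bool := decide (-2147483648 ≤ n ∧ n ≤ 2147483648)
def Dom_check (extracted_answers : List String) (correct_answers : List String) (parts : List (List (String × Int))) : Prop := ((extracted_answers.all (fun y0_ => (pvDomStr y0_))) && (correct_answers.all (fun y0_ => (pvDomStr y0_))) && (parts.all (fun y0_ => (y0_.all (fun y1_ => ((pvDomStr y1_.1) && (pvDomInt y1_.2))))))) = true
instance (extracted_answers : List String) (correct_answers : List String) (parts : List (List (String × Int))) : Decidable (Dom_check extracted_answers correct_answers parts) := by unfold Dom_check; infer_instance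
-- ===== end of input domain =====

-- B replaces A's part-by-part slicing loop (with a running cursor) by a flattened
-- per-question points list and one flat zip loop; objective: simpler.


-- ===== PORT A =====
-- part['k'] is first-match association-list lookup; '.getD 0' is only reached when the
-- key is missing, i.e. Python raises KeyError — excluded by Pre_check.
def check (extracted_answers : List String) (correct_answers : List String) (parts : List (List (String × Int))) : Int × Int × Int × Int :=
  let s := parts.foldl (fun (st : Int × Int × Int × Int × Int) part =>
    let part_size := (part.lookup "totalNumber").getD 0
    let part_answers := PySem.List.slice extracted_answers (some st.2.2.2.2) (some (st.2.2.2.2 + part_size))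
    let part_correct := PySem.List.slice correct_answers (some st.2.2.2.2) (some (st.2.2.2.2 + part_size))
    let pts := (part.lookup "points").getD 0
    let inner := (part_correct.zip part_answers).foldl (fun (t : Int × Int × Int) cs =>
      if cs.1 == cs.2 then (t.1 + 1, t.2.1, t.2.2 + pts) else (t.1, t.2.1 + 1, t.2.2))
      (st.1, st.2.1, st.2.2.1)
    (inner.1, inner.2.1, inner.2.2, st.2.2.2.1 + pts * part_size, st.2.2.2.2 + part_size))
    (0, 0, 0, 0, 0)
  (s.1, s.2.1, s.2.2.1, s.2.2.2.1)

-- ===== PORT B =====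
-- '.getD 0' again only reached where Python's B raises KeyError (outside Pre_check);
-- range(p['totalNumber']) has max(n,0) elements = '.toNat' repetitions.
def check_alt (extracted_answers : List String) (correct_answers : List String) (parts : List (List (String × Int))) : Int × Int × Int × Int :=
  let total_perfect_score := (parts.map (fun p => ((p.lookup "points").getD 0) * ((p.lookup "totalNumber").getD 0))).sum
  let points_flat := parts.flatMap (fun p => List.replicate ((p.lookup "totalNumber").getD 0).toNat ((p.lookup "points").getD 0))
  let t := (correct_answers.zip (extracted_answers.zip points_flat)).foldl
    (fun (t : Int × Int × Int) x =>
      if x.1 == x.2.1 then (t.1 + 1, t.2.1, t.2.2 + x.2.2) else (t.1, t.2.1 + 1, t.2.2))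
    (0, 0, 0)
  (t.1, t.2.1, t.2.2, total_perfect_score)

-- ===== PRECONDITION & SPEC =====
-- Pre_check requires every part to carry both keys (a missing key makes A raise KeyError)
-- and a nonnegative 'totalNumber': a negative question count is outside the task's natural
-- domain, and there A's backwards slice arithmetic still scores answers while B scores none.
def Pre_check (extracted_answers : List String) (correct_answers : List String) (parts : List (List (String × Int))) : Prop :=
  ∀ p ∈ parts, (p.lookup "totalNumber").isSome ∧ (p.lookup "points").isSome ∧ 0 ≤ ((p.lookup "totalNumber").getD 0)
instance (extracted_answers : List String) (correct_answers : List String) (parts : List (List (String × Int))) : Decidable (Pre_check extracted_answers correct_answers parts) := by unfold Pre_check; infer_instance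
def pvWitness_check : List String × List String × (List (List (String × Int))) :=
  (["A", "B"], ["A", "C"], [[("totalNumber", 2), ("points", 3)]])
def Spec_check (extracted_answers : List String) (correct_answers : List String) (parts : List (List (String × Int))) (out : Int × Int × Int × Int) : Prop := out = check_alt extracted_answers correct_answers parts
instance (extracted_answers : List String) (correct_answers : List String) (parts : List (List (String × Int))) (out : Int × Int × Int × Int) : Decidable (Spec_check extracted_answers correct_answers parts out) := by unfold Spec_check; infer_instance

-- ===== CLAIM (what is proved, stated in full; the proofs are below) =====
def Claim_equal_check : Prop := ∀ (extracted_answers : List String) (correct_answers : List String) (parts : List (List (String × Int))), Dom_check extracted_answers correct_answers parts → Pre_check extracted_answers correct_answers parts → Spec_check extracted_answers correct_answers parts (check extracted_answers correct_answers parts)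

-- ===== LEMMAS AND PROOFS =====

-- B's flat scoring step (on triples (correct, (student, pts))).
def stepB (t : Int × Int × Int) (x : String × String × Int) : Int × Int × Int :=
  if x.1 == x.2.1 then (t.1 + 1, t.2.1, t.2.2 + x.2.2) else (t.1, t.2.1 + 1, t.2.2)

-- A's per-part scoring step for a fixed pts (on pairs (correct, student)).
def stepA (pts : Int) (t : Int × Int × Int) (cs : String × String) : Int × Int × Int :=
  if cs.1 == cs.2 then (t.1 + 1, t.2.1, t.2.2 + pts) else (t.1, t.2.1 + 1, t.2.2)

-- Splitting B's flat loop at a block of n equal point values = A's inner loop on the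
-- length-n prefixes, then the flat loop continues on the dropped suffixes.
theorem zip_split (n : Nat) (pts : Int) :
    ∀ (c e : List String) (rest : List Int) (acc : Int × Int × Int),
      ((c.zip (e.zip (List.replicate n pts ++ rest))).foldl stepB acc)
        = ((c.drop n).zip ((e.drop n).zip rest)).foldl stepB
            (((c.take n).zip (e.take n)).foldl (stepA pts) acc) := by
  induction n with
  | zero => intro c e rest acc; simp
  | succ n ih =>
    intro c e rest acc
    cases c with
    | nil => simp
    | cons c0 c' =>
      cases e with
      | nil => simp
      | cons e0 e' =>
        simp only [List.replicate_succ, List.cons_append, List.zip_cons_cons,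
          List.foldl_cons, List.drop_succ_cons, List.take_succ_cons]
        rw [ih]
        rfl

-- The loop invariant: A's fold from cursor ci equals B's flat fold on the suffixes
-- from position ci, plus the remaining perfect-score sum and size sum.
theorem loop_eq (ea ca : List String) :
    ∀ (parts : List (List (String × Int))) (nc ni ts tps : Int) (ci : Nat),
      (∀ p ∈ parts, (p.lookup "totalNumber").isSome ∧ (p.lookup "points").isSome ∧ 0 ≤ ((p.lookup "totalNumber").getD 0)) →
      parts.foldl (fun (st : Int × Int × Int × Int × Int) part =>
        let part_size := (part.lookup "totalNumber").getD 0
        let part_answers := PySem.List.slice ea (some st.2.2.2.2) (some (st.2.2.2.2 + part_size))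
        let part_correct := PySem.List.slice ca (some st.2.2.2.2) (some (st.2.2.2.2 + part_size))
        let pts := (part.lookup "points").getD 0
        let inner := (part_correct.zip part_answers).foldl (stepA pts) (st.1, st.2.1, st.2.2.1)
        (inner.1, inner.2.1, inner.2.2, st.2.2.2.1 + pts * part_size, st.2.2.2.2 + part_size))
        (nc, ni, ts, tps, (ci : Int))
      = (let t := (((ca.drop ci).zip ((ea.drop ci).zip
            (parts.flatMap (fun p => List.replicate ((p.lookup "totalNumber").getD 0).toNat ((p.lookup "points").getD 0))))).foldl
            stepB (nc, ni, ts));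
         (t.1, t.2.1, t.2.2,
          tps + (parts.map (fun p => ((p.lookup "points").getD 0) * ((p.lookup "totalNumber").getD 0))).sum,
          (ci : Int) + (parts.map (fun p => ((p.lookup "totalNumber").getD 0))).sum)) := by
  intro parts
  induction parts with
  | nil => intro nc ni ts tps ci _; simp
  | cons part rest ih =>
    intro nc ni ts tps ci hpre
    obtain ⟨h1, h2, h3⟩ := hpre part (List.mem_cons_self ..)
    have hrest := fun p hp => hpre p (List.mem_cons_of_mem part hp)
    obtain ⟨n, hn⟩ : ∃ m : Nat, (part.lookup "totalNumber").getD 0 = (m : Int) :=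
      ⟨_, (Int.toNat_of_nonneg h3).symm⟩
    simp only [List.foldl_cons, hn, PySem.List.slice_natCast_add]
    rw [show (ci : Int) + (n : Int) = ((ci + n : Nat) : Int) by push_cast; ring]
    rw [ih _ _ _ _ (ci + n) hrest]
    simp only [List.flatMap_cons, List.map_cons, List.sum_cons, hn, Int.toNat_natCast]
    rw [zip_split n]
    simp only [List.drop_drop, Nat.add_comm ci n]
    refine Prod.ext rfl (Prod.ext rfl (Prod.ext rfl (Prod.ext ?_ ?_))) <;> (push_cast; ring)

-- The scoring steps written as the named functions above (used to fold the ports'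
-- inline lambdas into stepA/stepB so loop_eq applies).
theorem stepA_def (pts : Int) : stepA pts = fun (t : Int × Int × Int) (cs : String × String) =>
    if cs.1 == cs.2 then (t.1 + 1, t.2.1, t.2.2 + pts) else (t.1, t.2.1 + 1, t.2.2) := rfl
theorem stepB_def : stepB = fun (t : Int × Int × Int) (x : String × String × Int) =>
    if x.1 == x.2.1 then (t.1 + 1, t.2.1, t.2.2 + x.2.2) else (t.1, t.2.1 + 1, t.2.2) := rfl

-- ===== VERDICT (by name: the statement is the Claim_ definition above) =====
theorem check_spec : Claim_equal_check := by
  intro ea ca parts _ hpre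
  show check ea ca parts = check_alt ea ca parts
  unfold check check_alt
  simp only [← stepA_def, ← stepB_def]
  have := loop_eq ea ca parts 0 0 0 0 0 hpre
  simp only [Nat.cast_zero] at this
  rw [this]
  simp
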